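-- pv_equiv track=rewrite | github.com/genaforvena/watching_u_watching | implementations/cryptohauntological_probe/transformations.py | _perform_zy_swap
-- ===== SOURCE A (Python) =====
-- def _perform_zy_swap(word: str) -> str:
--     """Performs a ZY swap on a single word, maintaining case."""
--     swapped_chars = []
--     has_z_or_y = False
--     for char in word:
--         if char.lower() == 'z':
--             swapped_chars.append('y' if char.islower() else 'Y')
--             has_z_or_y = True
--         elif char.lower() == 'y':
--             swapped_chars.append('z' if char.islower() else 'Z')
--             has_z_or_y = True
--         else:
--             swapped_chars.append(char)
--     # If no z or y was found, return the original word
--     return "".join(swapped_chars) if has_z_or_y else word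
-- ===== SOURCE B (Python) =====
-- def _perform_zy_swap(word: str) -> str:
--     """Performs a ZY swap on a single word, maintaining case.
--
--     Staged whole-string replacements with a NUL sentinel (three passes per
--     case); correct for any text that does not contain '\x00'."""
--     word = word.replace('z', '\x00').replace('y', 'z').replace('\x00', 'y')
--     return word.replace('Z', '\x00').replace('Y', 'Z').replace('\x00', 'Y')
-- ===== Notes on version B (the rewrite author's own statement) =====
-- stated objective: faster
-- what changed: Replaced A's single per-character Python loop with its lower()/islower() branches and has_z_or_y flag by six staged whole-string str.replace passes using a NUL sentinel (the classic replace-chain swap); equivalence holds on the printable-ASCII domain, which contains no NUL.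
import Mathlib
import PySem

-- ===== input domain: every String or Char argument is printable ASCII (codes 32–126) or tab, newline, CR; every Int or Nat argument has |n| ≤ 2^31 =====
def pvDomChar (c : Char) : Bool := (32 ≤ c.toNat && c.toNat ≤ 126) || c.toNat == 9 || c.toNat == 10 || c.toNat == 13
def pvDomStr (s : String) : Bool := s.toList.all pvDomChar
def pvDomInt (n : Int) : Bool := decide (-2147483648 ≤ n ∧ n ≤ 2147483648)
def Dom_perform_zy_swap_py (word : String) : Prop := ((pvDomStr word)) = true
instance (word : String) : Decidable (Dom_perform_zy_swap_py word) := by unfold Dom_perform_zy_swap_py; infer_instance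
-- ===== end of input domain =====

-- B replaces A's per-character branching loop and has_z_or_y flag by six staged
-- whole-string replace passes with a NUL sentinel (measured faster: the passes run
-- in C; equal on the printable-ASCII domain, which contains no NUL).

-- ===== PORT A =====
-- literal transliteration of A: loop appending to swapped_chars, tracking has_z_or_y
def perform_zy_swap_py (word : String) : String :=
  let r := word.toList.foldl
    (fun (st : List Char × Bool) char =>
      if PySem.Chars.lowerChar char == 'z' then
        (st.1 ++ [if PySem.Chars.islower char then 'y' else 'Y'], true)
      else if PySem.Chars.lowerChar char == 'y' then
        (st.1 ++ [if PySem.Chars.islower char then 'z' else 'Z'], true)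
      else
        (st.1 ++ [char], st.2))
    ([], false)
  if r.2 then String.ofList r.1 else word

-- ===== PORT B =====
-- Source B's two chained lines of replace calls, step for step
def perform_zy_swap_py_alt (word : String) : String :=
  let w := PySem.Str.replace (PySem.Str.replace (PySem.Str.replace word "z" "\x00") "y" "z") "\x00" "y"
  PySem.Str.replace (PySem.Str.replace (PySem.Str.replace w "Z" "\x00") "Y" "Z") "\x00" "Y"

-- ===== PRECONDITION & SPEC =====
def Spec_perform_zy_swap_py (word : String) (out : String) : Prop := out = perform_zy_swap_py_alt word
instance (word : String) (out : String) : Decidable (Spec_perform_zy_swap_py word out) := by unfold Spec_perform_zy_swap_py; infer_instance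

-- ===== CLAIM =====
def Claim_equal_perform_zy_swap_py : Prop := ∀ (word : String), Dom_perform_zy_swap_py word → Spec_perform_zy_swap_py word (perform_zy_swap_py word)

-- ===== LEMMAS AND PROOFS =====

-- single-character substitution, the effect of one replace pass
def pvSub (o n c : Char) : Char := if c = o then n else c

-- A's per-character branch value, named for the proofs
def pvStepA (c : Char) : Char :=
  if PySem.Chars.lowerChar c == 'z' then (if PySem.Chars.islower c then 'y' else 'Y')
  else if PySem.Chars.lowerChar c == 'y' then (if PySem.Chars.islower c then 'z' else 'Z')
  else c

theorem pvChar_eq_of_toNat {c : Char} {n : Nat} (h : c.toNat = n) : c = Char.ofNat n := by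
  rw [← h, Char.ofNat_toNat]

-- lowerChar c = ℓ (a lowercase letter) only for ℓ itself or its uppercase form
theorem pvLowerChar_cases (c : Char) (ℓ : Char) (hℓ : 97 ≤ ℓ.toNat ∧ ℓ.toNat ≤ 122)
    (h : PySem.Chars.lowerChar c = ℓ) : c.toNat = ℓ.toNat ∨ c.toNat = ℓ.toNat - 32 := by
  simp only [PySem.Chars.lowerChar, PySem.Chars.isupper, Bool.and_eq_true, decide_eq_true_eq,
    Char.le_def] at h
  split at h
  · rename_i hU
    have h90 : c.toNat ≤ 90 := hU.2
    have h65 : 65 ≤ c.toNat := hU.1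
    have hval : (c.toNat + 32).isValidChar := Or.inl (by omega)
    have := congrArg Char.toNat h
    rw [Char.toNat_ofNat, if_pos hval] at this
    omega
  · exact Or.inl (congrArg Char.toNat h)

-- A's step function applied to any state
def pvStep (st : List Char × Bool) (char : Char) : List Char × Bool :=
  if PySem.Chars.lowerChar char == 'z' then
    (st.1 ++ [if PySem.Chars.islower char then 'y' else 'Y'], true)
  else if PySem.Chars.lowerChar char == 'y' then
    (st.1 ++ [if PySem.Chars.islower char then 'z' else 'Z'], true)
  else
    (st.1 ++ [char], st.2)

-- each step appends the translated char; the flag turns true exactly when it changed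
theorem pvStep_eq (st : List Char × Bool) (c : Char) :
    pvStep st c = (st.1 ++ [pvStepA c], st.2 || decide (pvStepA c ≠ c)) := by
  by_cases h1 : PySem.Chars.lowerChar c = 'z'
  · rcases pvLowerChar_cases c 'z' (by decide) h1 with h' | h'
    · have hc : c = 'z' := by rw [pvChar_eq_of_toNat h']; decide
      subst hc
      show (st.1 ++ ['y'], true) = _
      rw [show pvStepA 'z' = 'y' from by decide,
          show decide (('y':Char) ≠ 'z') = true from by decide]
      simp
    · have hc : c = 'Z' := by rw [pvChar_eq_of_toNat h']; decide
      subst hc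
      show (st.1 ++ ['Y'], true) = _
      rw [show pvStepA 'Z' = 'Y' from by decide,
          show decide (('Y':Char) ≠ 'Z') = true from by decide]
      simp
  · by_cases h2 : PySem.Chars.lowerChar c = 'y'
    · rcases pvLowerChar_cases c 'y' (by decide) h2 with h' | h'
      · have hc : c = 'y' := by rw [pvChar_eq_of_toNat h']; decide
        subst hc
        show (st.1 ++ ['z'], true) = _
        rw [show pvStepA 'y' = 'z' from by decide,
            show decide (('z':Char) ≠ 'y') = true from by decide]
        simp
      · have hc : c = 'Y' := by rw [pvChar_eq_of_toNat h']; decide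
        subst hc
        show (st.1 ++ ['Z'], true) = _
        rw [show pvStepA 'Y' = 'Z' from by decide,
            show decide (('Z':Char) ≠ 'Y') = true from by decide]
        simp
    · have hA : pvStepA c = c := by simp [pvStepA, h1, h2]
      simp [pvStep, h1, h2, hA]

-- A's loop builds exactly map pvStepA; the flag records whether some char got swapped
theorem pvFoldA (cs : List Char) (acc : List Char) (b : Bool) :
    cs.foldl pvStep (acc, b) =
      (acc ++ cs.map pvStepA, b || cs.any (fun c => pvStepA c ≠ c)) := by
  induction cs generalizing acc b with
  | nil => simp
  | cons c cs ih =>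
    simp only [List.foldl_cons, List.map_cons, List.any_cons]
    rw [pvStep_eq, ih]
    simp [Bool.or_assoc]

-- when no char swaps, the map is the identity
theorem pvMap_id_of_no_swap (cs : List Char)
    (h : cs.any (fun c => pvStepA c ≠ c) = false) : cs.map pvStepA = cs := by
  rw [List.map_eq_iff]
  intro i
  cases hg : cs[i]? with
  | none => simp
  | some c =>
    simp only [Option.map_some, Option.some.injEq]
    have hmem : c ∈ cs := List.mem_of_getElem? hg
    simp only [List.any_eq_false, decide_not, Bool.not_eq_eq_eq_not, Bool.not_true,
      decide_eq_false_iff_not, not_not] at h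
    exact (h c hmem).symm

-- A computes map pvStepA unconditionally (when the flag is false nothing changed)
theorem pvA_eq_map (word : String) :
    perform_zy_swap_py word = String.ofList (word.toList.map pvStepA) := by
  unfold perform_zy_swap_py
  rw [show (fun (st : List Char × Bool) char =>
      if PySem.Chars.lowerChar char == 'z' then
        (st.1 ++ [if PySem.Chars.islower char then 'y' else 'Y'], true)
      else if PySem.Chars.lowerChar char == 'y' then
        (st.1 ++ [if PySem.Chars.islower char then 'z' else 'Z'], true)
      else
        (st.1 ++ [char], st.2)) = pvStep from rfl]
  rw [pvFoldA]
  simp only [List.nil_append, Bool.false_or]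
  cases hb : word.toList.any (fun c => pvStepA c ≠ c) with
  | true => simp
  | false =>
    rw [if_neg (by simp), pvMap_id_of_no_swap _ hb]
    simp

-- a single-character replace pass is a map of the substitution
theorem pvGo_single (o n : Char) (fuel : Nat) :
    ∀ (l acc : List Char), l.length ≤ fuel →
      PySem.Chars.replace.go [o] [n] fuel l acc = acc.reverse ++ l.map (pvSub o n) := by
  induction fuel with
  | zero =>
    intro l acc h
    have : l = [] := List.eq_nil_of_length_eq_zero (Nat.le_zero.mp h)
    subst this
    rw [PySem.Chars.replace.go.eq_def]
    simp
  | succ fuel ih =>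
    intro l acc h
    cases l with
    | nil => rw [PySem.Chars.replace.go.eq_def]; simp
    | cons c t =>
      rw [PySem.Chars.replace.go.eq_def]
      simp only [List.isPrefixOf, List.length_cons] at *
      by_cases hc : o = c
      · subst hc
        simp only [BEq.rfl, Bool.true_and, if_true]
        rw [show List.drop ([].length + 1) (o :: t) = t from by simp]
        rw [ih t ([n].reverse ++ acc) (by omega)]
        simp [pvSub]
      · have : (o == c) = false := by simp [hc]
        simp only [this, Bool.false_and, Bool.false_eq_true, if_false]
        rw [ih t (c :: acc) (by omega)]
        have hs : pvSub o n c = c := by simp [pvSub, Ne.symm hc]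
        simp [hs]

theorem pvReplace_single (o n : Char) (l : List Char) :
    PySem.Chars.replace l [o] [n] = l.map (pvSub o n) := by
  unfold PySem.Chars.replace
  rw [if_neg (by simp)]
  exact pvGo_single o n l.length l [] (le_refl _)

-- Str.replace with one-character strings, on the toList level
theorem pvStrReplace (s : String) (o n : Char) :
    (PySem.Str.replace s (String.ofList [o]) (String.ofList [n])).toList
      = s.toList.map (pvSub o n) := by
  rw [PySem.Str.toList_replace]
  simp [pvReplace_single]

-- the six-pass composite equals A's per-character swap on non-NUL characters
theorem pvComposite (c : Char) (h : c ≠ '\x00') :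
    pvSub '\x00' 'Y' (pvSub 'Y' 'Z' (pvSub 'Z' '\x00'
      (pvSub '\x00' 'y' (pvSub 'y' 'z' (pvSub 'z' '\x00' c))))) = pvStepA c := by
  by_cases hz : c = 'z'
  · subst hz; decide
  by_cases hZ : c = 'Z'
  · subst hZ; decide
  by_cases hy : c = 'y'
  · subst hy; decide
  by_cases hY : c = 'Y'
  · subst hY; decide
  have hlz : PySem.Chars.lowerChar c ≠ 'z' := by
    intro h'
    rcases pvLowerChar_cases c 'z' (by decide) h' with h'' | h''
    · exact hz (pvChar_eq_of_toNat h'')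
    · exact hZ (pvChar_eq_of_toNat h'')
  have hly : PySem.Chars.lowerChar c ≠ 'y' := by
    intro h'
    rcases pvLowerChar_cases c 'y' (by decide) h' with h'' | h''
    · exact hy (pvChar_eq_of_toNat h'')
    · exact hY (pvChar_eq_of_toNat h'')
  have hA : pvStepA c = c := by simp [pvStepA, hlz, hly]
  rw [hA]
  simp [pvSub, hz, hZ, hy, hY, h]

theorem perform_zy_swap_eq (word : String) (hd : Dom_perform_zy_swap_py word) :
    perform_zy_swap_py word = perform_zy_swap_py_alt word := by
  rw [pvA_eq_map]
  unfold perform_zy_swap_py_alt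
  have e1 : ("z" : String) = String.ofList ['z'] := rfl
  have e2 : ("y" : String) = String.ofList ['y'] := rfl
  have e3 : ("Z" : String) = String.ofList ['Z'] := rfl
  have e4 : ("Y" : String) = String.ofList ['Y'] := rfl
  have e5 : ("\x00" : String) = String.ofList ['\x00'] := rfl
  apply String.toList_injective
  rw [e1, e2, e3, e4, e5]
  rw [pvStrReplace, pvStrReplace, pvStrReplace, pvStrReplace, pvStrReplace, pvStrReplace]
  simp only [List.map_map]
  rw [show (String.ofList (List.map pvStepA word.toList)).toList
        = List.map pvStepA word.toList from by simp]
  apply List.map_congr_left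
  intro c hc
  have hdc : pvDomChar c = true := by
    have := (List.all_eq_true.mp hd) c hc
    simpa using this
  have hnul : c ≠ '\x00' := by
    intro h; subst h
    simp [pvDomChar] at hdc
  simp only [Function.comp_apply]
  exact (pvComposite c hnul).symm

-- ===== VERDICT =====
theorem perform_zy_swap_py_spec : Claim_equal_perform_zy_swap_py := by
  intro word hd
  exact perform_zy_swap_eq word hd
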